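-- pv_equiv track=rewrite | github.com/yacine-ammi/control_files_app | functions.py | restructure_results
-- ===== SOURCE A (Python) =====
-- def restructure_results(results):
--     restructured = {'warnings': {}, 'alerts': {}}
--
--     for key, value in results.items():
--         if not value:
--             continue
--
--         for entry in value:
--             if 'warning' in entry:
--                 if key not in restructured['warnings']:
--                     restructured['warnings'][key] = []
--                 restructured['warnings'][key].append(entry['warning'])
--             elif 'alert' in entry:
--                 if key not in restructured['alerts']:
--                     restructured['alerts'][key] = []
--                 restructured['alerts'][key].append(entry['alert'])
--
--     return restructured
-- ===== SOURCE B (Python) =====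
-- def restructure_results(results):
--     # Two independent passes (one per bucket) instead of one interleaved dispatch loop.
--     def bucket(pick):
--         out = {}
--         for key, entries in results.items():
--             picked = [x for x in map(pick, entries) if x is not None]
--             if picked:
--                 out[key] = picked
--         return out
--     return {
--         'warnings': bucket(lambda e: e.get('warning')),
--         'alerts': bucket(lambda e: None if 'warning' in e else e.get('alert')),
--     }
-- ===== Notes on version B (the rewrite author's own statement) =====
-- stated objective: simpler
-- what changed: B builds the 'warnings' and 'alerts' buckets as two independent filter-map passes over the results (a reusable bucket(pick) helper that keeps only keys with a non-empty picked list), replacing A's single interleaved loop that dispatches each entry into one of two mutable dicts with create-if-absent-then-append bookkeeping; Pre_ only excludes association lists with duplicate keys, which do not represent a Python dict.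
import Mathlib
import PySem

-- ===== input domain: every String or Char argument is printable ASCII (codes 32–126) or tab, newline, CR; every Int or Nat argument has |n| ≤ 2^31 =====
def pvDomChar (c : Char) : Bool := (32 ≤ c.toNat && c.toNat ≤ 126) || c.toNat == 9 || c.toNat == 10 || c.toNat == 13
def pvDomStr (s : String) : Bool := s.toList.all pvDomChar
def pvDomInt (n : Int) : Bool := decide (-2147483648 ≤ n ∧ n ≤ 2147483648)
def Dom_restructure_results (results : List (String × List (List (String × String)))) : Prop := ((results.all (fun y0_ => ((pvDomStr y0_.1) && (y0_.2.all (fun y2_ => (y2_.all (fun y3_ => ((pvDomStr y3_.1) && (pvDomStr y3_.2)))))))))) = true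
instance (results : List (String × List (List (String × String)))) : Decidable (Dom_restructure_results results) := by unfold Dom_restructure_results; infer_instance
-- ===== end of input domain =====

-- B builds the two buckets by two independent filter-map passes instead of A's single
-- interleaved dispatch loop over mutable dicts; objective: simpler decomposition, same cost.


-- ===== PORT A =====
-- the body of A's inner 'for entry in value' loop ('entry in d' / 'd[x]' via PySem.Dict on the entry)
def pvAStep (key : String)
    (st : PySem.Dict String (List String) × PySem.Dict String (List String))
    (entry : List (String × String)) :
    PySem.Dict String (List String) × PySem.Dict String (List String) :=
  let d := PySem.Dict.mk entry
  if (d.get? "warning").isSome then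
    -- if key not in restructured['warnings']: … = [];  then .append(entry['warning'])
    let w := if st.1.contains key then st.1 else st.1.insert key []
    (w.modify key [] (fun l => l ++ [(d.get? "warning").getD ""]), st.2)
  else if (d.get? "alert").isSome then
    let a := if st.2.contains key then st.2 else st.2.insert key []
    (st.1, a.modify key [] (fun l => l ++ [(d.get? "alert").getD ""]))
  else st

def restructure_results (results : List (String × List (List (String × String)))) : List (String × List (String × List String)) :=
  let st := results.foldl
    (fun st kv => if kv.2 = [] then st else kv.2.foldl (pvAStep kv.1) st)
    (PySem.Dict.empty, PySem.Dict.empty)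
  [("warnings", st.1.items), ("alerts", st.2.items)]

-- ===== PORT B =====
-- pick 'warning' from an entry (entry.get('warning'))
def pvSelW (e : List (String × String)) : Option String := (PySem.Dict.mk e).get? "warning"
-- pick 'alert', but only from entries without a 'warning' (honours A's elif precedence)
def pvSelA (e : List (String × String)) : Option String :=
  if (pvSelW e).isSome then none else (PySem.Dict.mk e).get? "alert"

-- one bucket: keep each key whose picked list is non-empty
def pvBucket (results : List (String × List (List (String × String))))
    (pick : List (String × String) → Option String) : List (String × List String) :=
  results.filterMap (fun kv =>
    let picked := kv.2.filterMap pick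
    if picked = [] then none else some (kv.1, picked))

def restructure_results_alt (results : List (String × List (List (String × String)))) : List (String × List (String × List String)) :=
  [("warnings", pvBucket results pvSelW), ("alerts", pvBucket results pvSelA)]

-- ===== PRECONDITION & SPEC =====
-- Pre_ excludes association lists with duplicate top-level keys: they do not represent a
-- Python dict (Python collapses duplicate keys before the call), so A's merging of both
-- occurrences is an artefact of the encoding.
def Pre_restructure_results (results : List (String × List (List (String × String)))) : Prop :=
  (results.map Prod.fst).Nodup
instance (results : List (String × List (List (String × String)))) : Decidable (Pre_restructure_results results) := by unfold Pre_restructure_results; infer_instance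

def pvWitness_restructure_results : (List (String × List (List (String × String)))) :=
  [("k", [[("warning", "w")], [("alert", "a")]]), ("j", [[("note", "n")], [("alert", "z")]])]

def Spec_restructure_results (results : List (String × List (List (String × String)))) (out : List (String × List (String × List String))) : Prop := out = restructure_results_alt results
instance (results : List (String × List (List (String × String)))) (out : List (String × List (String × List String))) : Decidable (Spec_restructure_results results out) := by unfold Spec_restructure_results; infer_instance

-- ===== CLAIM (what is proved, stated in full; the proofs are below) =====
def Claim_equal_restructure_results : Prop := ∀ (results : List (String × List (List (String × String)))), Dom_restructure_results results → Pre_restructure_results results → Spec_restructure_results results (restructure_results results)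

-- ===== LEMMAS AND PROOFS =====

-- proof-side view of one coordinate of pvAStep: update a dict with an optional picked value
def pvUpd (k : String) (d : PySem.Dict String (List String)) (x? : Option String) :
    PySem.Dict String (List String) :=
  match x? with
  | none => d
  | some x => (if d.contains k then d else d.insert k []).modify k [] (fun l => l ++ [x])

lemma pv_modify_push (d : PySem.Dict String (List String)) (k : String) (L : List String)
    (x : String) (hd : d.contains k = false) :
    (PySem.Dict.mk (d.items ++ [(k, L)])).modify k [] (fun l => l ++ [x])
      = PySem.Dict.mk (d.items ++ [(k, L ++ [x])]) := by
  have hall : ∀ p ∈ d.items, (p.1 == k) = false := by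
    intro p hp
    have := (List.any_eq_false).mp hd p hp
    simpa using this
  have hfind : d.items.find? (fun p => p.1 == k) = none :=
    List.find?_eq_none.mpr (by intro p hp; simp [hall p hp])
  have hne : ∀ p ∈ d.items, p.1 ≠ k := by
    intro p hp; simpa using hall p hp
  have hmap : d.items.map (fun p => if p.1 = k then (k, L ++ [x]) else p) = d.items := by
    calc d.items.map (fun p => if p.1 = k then (k, L ++ [x]) else p)
        = d.items.map (fun p => p) := List.map_congr_left (fun p hp => if_neg (hne p hp))
      _ = d.items := by simp
  simp [PySem.Dict.modify, PySem.Dict.insert, PySem.Dict.contains, PySem.Dict.getD,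
        PySem.Dict.get?, List.find?_append, hfind, List.map_append, hmap]

lemma pv_upd_some_fresh (d : PySem.Dict String (List String)) (k x : String)
    (hd : d.contains k = false) :
    pvUpd k d (some x) = PySem.Dict.mk (d.items ++ [(k, [x])]) := by
  have hins : d.insert k [] = PySem.Dict.mk (d.items ++ [(k, ([] : List String))]) := by
    simp [PySem.Dict.insert, hd]
  have := pv_modify_push d k [] x hd
  simpa [pvUpd, hd, hins] using this

lemma pv_upd_some_present (d : PySem.Dict String (List String)) (k x : String) (L : List String)
    (hd : d.contains k = false) :
    pvUpd k (PySem.Dict.mk (d.items ++ [(k, L)])) (some x)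
      = PySem.Dict.mk (d.items ++ [(k, L ++ [x])]) := by
  have hc : (PySem.Dict.mk (d.items ++ [(k, L)])).contains k = true := by
    simp [PySem.Dict.contains]
  simp only [pvUpd, hc, if_true]
  exact pv_modify_push d k L x hd

lemma pv_foldl_upd_present (d : PySem.Dict String (List String)) (k : String)
    (hd : d.contains k = false) :
    ∀ (xs : List (Option String)) (L : List String),
      xs.foldl (pvUpd k) (PySem.Dict.mk (d.items ++ [(k, L)]))
        = PySem.Dict.mk (d.items ++ [(k, L ++ xs.filterMap id)]) := by
  intro xs
  induction xs with
  | nil => intro L; simp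
  | cons x? xs ih =>
    intro L
    cases x? with
    | none => simpa [pvUpd] using ih L
    | some x =>
      simp only [List.foldl_cons, pv_upd_some_present d k x L hd]
      rw [ih (L ++ [x])]
      simp

lemma pv_foldl_upd_fresh (d : PySem.Dict String (List String)) (k : String)
    (hd : d.contains k = false) (xs : List (Option String)) :
    xs.foldl (pvUpd k) d
      = if xs.filterMap id = [] then d
        else PySem.Dict.mk (d.items ++ [(k, xs.filterMap id)]) := by
  induction xs with
  | nil => simp
  | cons x? xs ih =>
    cases x? with
    | none => simpa [pvUpd] using ih
    | some x =>
      simp only [List.foldl_cons, pv_upd_some_fresh d k x hd]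
      rw [pv_foldl_upd_present d k hd xs [x]]
      simp

lemma pv_inner_decomp (k : String) :
    ∀ (v : List (List (String × String)))
      (st : PySem.Dict String (List String) × PySem.Dict String (List String)),
      v.foldl (pvAStep k) st
        = ((v.map pvSelW).foldl (pvUpd k) st.1, (v.map pvSelA).foldl (pvUpd k) st.2) := by
  intro v
  induction v with
  | nil => intro st; simp
  | cons e v ih =>
    intro st
    have hstep : pvAStep k st e = (pvUpd k st.1 (pvSelW e), pvUpd k st.2 (pvSelA e)) := by
      rcases hw : (PySem.Dict.mk e).get? "warning" with _ | w
      · rcases ha : (PySem.Dict.mk e).get? "alert" with _ | a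
        · simp [pvAStep, pvSelW, pvSelA, pvUpd, hw, ha]
        · simp [pvAStep, pvSelW, pvSelA, pvUpd, hw, ha]
      · simp [pvAStep, pvSelW, pvSelA, pvUpd, hw]
    simp only [List.foldl_cons, List.map_cons, hstep, ih]

lemma pv_contains_push (d : PySem.Dict String (List String)) (k k' : String) (L : List String)
    (hk' : d.contains k' = false) (hne : k' ≠ k) :
    (PySem.Dict.mk (d.items ++ [(k, L)])).contains k' = false := by
  simp [PySem.Dict.contains] at hk' ⊢
  exact ⟨hk', fun h => (hne h.symm).elim⟩

lemma pv_outer (rs : List (String × List (List (String × String)))) :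
    ∀ (W A : PySem.Dict String (List String)),
      (rs.map Prod.fst).Nodup →
      (∀ k ∈ rs.map Prod.fst, W.contains k = false) →
      (∀ k ∈ rs.map Prod.fst, A.contains k = false) →
      rs.foldl (fun st kv => if kv.2 = [] then st else kv.2.foldl (pvAStep kv.1) st) (W, A)
        = (PySem.Dict.mk (W.items ++ pvBucket rs pvSelW),
           PySem.Dict.mk (A.items ++ pvBucket rs pvSelA)) := by
  induction rs with
  | nil => intro W A _ _ _; simp [pvBucket]
  | cons kv rs ih =>
    intro W A hnd hW hA
    obtain ⟨k, v⟩ := kv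
    have hk : k ∈ ((k, v) :: rs).map Prod.fst := by simp
    have hWk := hW k hk
    have hAk := hA k hk
    have hnd' : (rs.map Prod.fst).Nodup := (List.nodup_cons.mp hnd).2
    have hknotin : k ∉ rs.map Prod.fst := (List.nodup_cons.mp hnd).1
    by_cases hv : v = []
    · subst hv
      simp only [List.foldl_cons, pvBucket, List.filterMap_cons]
      simpa [pvBucket] using
        ih W A hnd' (fun k' h => hW k' (by simp [h])) (fun k' h => hA k' (by simp [h]))
    · have hfold : ((k, v) :: rs).foldl
          (fun st kv => if kv.2 = [] then st else kv.2.foldl (pvAStep kv.1) st) (W, A)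
          = rs.foldl (fun st kv => if kv.2 = [] then st else kv.2.foldl (pvAStep kv.1) st)
              (v.foldl (pvAStep k) (W, A)) := by
        simp [hv]
      rw [hfold, pv_inner_decomp k v (W, A)]
      have hmapW : (v.map pvSelW).filterMap id = v.filterMap pvSelW := by
        simp [List.filterMap_map]
      have hmapA : (v.map pvSelA).filterMap id = v.filterMap pvSelA := by
        simp [List.filterMap_map]
      rw [pv_foldl_upd_fresh W k hWk, pv_foldl_upd_fresh A k hAk, hmapW, hmapA]
      set Lw := v.filterMap pvSelW with hLw
      set La := v.filterMap pvSelA with hLa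
      have hbW : pvBucket ((k, v) :: rs) pvSelW
          = (if Lw = [] then [] else [(k, Lw)]) ++ pvBucket rs pvSelW := by
        by_cases h : Lw = []
        · simp only [pvBucket, List.filterMap_cons, ← hLw, if_pos h, List.nil_append]
        · simp only [pvBucket, List.filterMap_cons, ← hLw, if_neg h, List.singleton_append]
      have hbA : pvBucket ((k, v) :: rs) pvSelA
          = (if La = [] then [] else [(k, La)]) ++ pvBucket rs pvSelA := by
        by_cases h : La = []
        · simp only [pvBucket, List.filterMap_cons, ← hLa, if_pos h, List.nil_append]
        · simp only [pvBucket, List.filterMap_cons, ← hLa, if_neg h, List.singleton_append]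
      have hfreshW : ∀ k' ∈ rs.map Prod.fst,
          (if Lw = [] then W else PySem.Dict.mk (W.items ++ [(k, Lw)])).contains k' = false := by
        intro k' h
        have hne : k' ≠ k := fun he => hknotin (he ▸ h)
        by_cases hL : Lw = []
        · simpa [hL] using hW k' (by simp [h])
        · simpa [hL] using pv_contains_push W k k' Lw (hW k' (by simp [h])) hne
      have hfreshA : ∀ k' ∈ rs.map Prod.fst,
          (if La = [] then A else PySem.Dict.mk (A.items ++ [(k, La)])).contains k' = false := by
        intro k' h
        have hne : k' ≠ k := fun he => hknotin (he ▸ h)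
        by_cases hL : La = []
        · simpa [hL] using hA k' (by simp [h])
        · simpa [hL] using pv_contains_push A k k' La (hA k' (by simp [h])) hne
      have := ih (if Lw = [] then W else PySem.Dict.mk (W.items ++ [(k, Lw)]))
                 (if La = [] then A else PySem.Dict.mk (A.items ++ [(k, La)]))
                 hnd' hfreshW hfreshA
      rw [this, hbW, hbA]
      by_cases hw : Lw = [] <;> by_cases ha : La = [] <;>
        simp [hw, ha, List.append_assoc]

-- ===== VERDICT (by name: the statement is the Claim_ definition above) =====
theorem restructure_results_spec : Claim_equal_restructure_results := by
  intro results _hDom hPre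
  unfold Spec_restructure_results restructure_results restructure_results_alt
  have h := pv_outer results PySem.Dict.empty PySem.Dict.empty hPre
    (fun k _ => by simp [PySem.Dict.contains, PySem.Dict.empty])
    (fun k _ => by simp [PySem.Dict.contains, PySem.Dict.empty])
  simp only [h]
  simp [PySem.Dict.empty]
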